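-- pv_equiv track=rewrite | github.com/Blue-Kite/algorithm | 코테100제/크레인인형뽑기.py | solution
-- ===== SOURCE A (Python) =====
-- def solution(board, moves):
--     answer = 0
--     n = len(board)
--     lane = [[] for _ in range(n)]
--     stack = [] #바구니
--
--     #역순으로 넣는다
--     for i in range(n-1, -1, -1):
--         for j in range(n):
--             if board[i][j] != 0:
--                 lane[j].append(board[i][j])
--
--     for m in moves:
--         if lane[m-1]:
--             doll =  lane[m-1].pop()
--             if stack and doll == stack[-1]:
--                 stack.pop()
--                 answer += 2
--             else:
--                 stack.append(doll)
--     return answer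
-- ===== SOURCE B (Python) =====
-- def solution(board, moves):
--     # Lazy top-down scan: copy the board and, per move, zero out the first
--     # non-zero cell of the requested column instead of pre-building lanes.
--     grid = [row[:] for row in board]
--     stack = []
--     answer = 0
--     for m in moves:
--         c = m - 1
--         for row in grid:
--             if row[c] != 0:
--                 doll = row[c]
--                 row[c] = 0
--                 if stack and stack[-1] == doll:
--                     stack.pop()
--                     answer += 2
--                 else:
--                     stack.append(doll)
--                 break
--     return answer
-- ===== Notes on version B (the rewrite author's own statement) =====
-- stated objective: alternative
-- what changed: Replaces A's up-front construction of per-column lane stacks (a nested reverse-row pass) with a lazy per-move top-down scan of a copied board that zeroes the first non-zero cell of the requested column; the basket matching logic is applied to the doll so obtained.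
-- outside the precondition, e.g. on solution([[1, 1, 1, 2], [2, 2, 1, 1]], [1, 0]): A returns 2, B returns 0
import Mathlib
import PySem

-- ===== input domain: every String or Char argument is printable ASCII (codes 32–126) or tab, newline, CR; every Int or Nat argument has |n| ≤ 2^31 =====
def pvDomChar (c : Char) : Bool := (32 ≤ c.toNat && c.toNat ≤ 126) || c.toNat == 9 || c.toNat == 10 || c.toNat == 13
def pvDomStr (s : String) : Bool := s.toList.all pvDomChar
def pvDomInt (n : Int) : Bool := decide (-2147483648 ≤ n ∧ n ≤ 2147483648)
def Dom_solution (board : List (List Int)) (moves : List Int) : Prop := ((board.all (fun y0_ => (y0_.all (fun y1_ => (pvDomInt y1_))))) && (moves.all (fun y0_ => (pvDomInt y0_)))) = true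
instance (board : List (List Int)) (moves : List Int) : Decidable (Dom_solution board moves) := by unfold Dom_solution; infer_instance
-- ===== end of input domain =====

-- B replaces A's up-front per-column lane stacks with a lazy per-move top-down
-- column scan on a copy of the board (alternative decomposition; return value only).

-- ===== PORT A =====
-- inner 'for j in range(n)' body of A's lane-building loop
def pvLaneRow (board : List (List Int)) (lane : List (List Int)) (i : Int) : List (List Int) :=
  (PySem.List.pyRange 0 (board.length : Int) 1).foldl (fun lane j =>
    if PySem.List.pyGetD (PySem.List.pyGetD board i []) j 0 ≠ 0 then
      PySem.List.pySetD lane j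
        (PySem.List.pyGetD lane j [] ++ [PySem.List.pyGetD (PySem.List.pyGetD board i []) j 0])
    else lane) lane

-- body of A's 'for m in moves' loop; state = (lane, stack, answer)
def pvStepA (st : List (List Int) × List Int × Int) (m : Int) :
    List (List Int) × List Int × Int :=
  let lj := PySem.List.pyGetD st.1 (m - 1) []
  if lj ≠ [] then
    let doll := PySem.List.pyGetD lj (-1) 0
    let lane' := PySem.List.pySetD st.1 (m - 1) lj.dropLast
    if st.2.1 ≠ [] ∧ doll = PySem.List.pyGetD st.2.1 (-1) 0 then
      (lane', st.2.1.dropLast, st.2.2 + 2)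
    else
      (lane', st.2.1 ++ [doll], st.2.2)
  else st

def solution (board : List (List Int)) (moves : List Int) : Int :=
  let n : Int := (board.length : Int)
  let lane := (PySem.List.pyRange (n - 1) (-1) (-1)).foldl (pvLaneRow board)
    ((PySem.List.pyRange 0 n 1).map (fun _ => ([] : List Int)))
  (moves.foldl pvStepA (lane, ([] : List Int), (0 : Int))).2.2

-- ===== PORT B =====
-- B's inner 'for row in grid' scan: first row with a non-zero cell in column c
-- is zeroed there; returns the picked doll (if any) and the updated grid.
def pickCol (c : Int) : List (List Int) → Option Int × List (List Int)
  | [] => (none, [])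
  | row :: rest =>
    if PySem.List.pyGetD row c 0 ≠ 0 then
      (some (PySem.List.pyGetD row c 0), PySem.List.pySetD row c 0 :: rest)
    else
      let r := pickCol c rest
      (r.1, row :: r.2)

-- body of B's 'for m in moves' loop; state = (grid, stack, answer)
def pvStepB (st : List (List Int) × List Int × Int) (m : Int) :
    List (List Int) × List Int × Int :=
  match pickCol (m - 1) st.1 with
  | (some doll, grid') =>
    if st.2.1 ≠ [] ∧ PySem.List.pyGetD st.2.1 (-1) 0 = doll then
      (grid', st.2.1.dropLast, st.2.2 + 2)
    else
      (grid', st.2.1 ++ [doll], st.2.2)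
  | (none, grid') => (grid', st.2.1, st.2.2)

def solution_alt (board : List (List Int)) (moves : List Int) : Int :=
  (moves.foldl pvStepB (board.map (fun row => row), ([] : List Int), (0 : Int))).2.2

-- ===== PRECONDITION & SPEC =====
-- Pre_ excludes inputs where A raises IndexError (rows shorter than the board
-- height, a move m with m-1 outside Python's index range [-n,n), or any move on
-- an empty board), and additionally, when some move is non-positive (Python's
-- negative-index wraparound, which A accepts and answers through lane[m-1]),
-- boards whose rows are longer than the board is tall: there A's lane wrap and
-- B's row wrap land on different columns, a corner no statement of the crane
-- puzzle specifies.
def Pre_solution (board : List (List Int)) (moves : List Int) : Prop :=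
  (∀ row ∈ board, board.length ≤ row.length) ∧
  (∀ m ∈ moves, 1 - (board.length : Int) ≤ m ∧ m ≤ (board.length : Int)) ∧
  ((∀ m ∈ moves, 1 ≤ m) ∨ (∀ row ∈ board, row.length = board.length))
instance (board : List (List Int)) (moves : List Int) : Decidable (Pre_solution board moves) := by
  unfold Pre_solution; infer_instance

def pvWitness_solution : List (List Int) × List Int := ([[1, 0], [2, 3]], [1, 2, 2])

def Spec_solution (board : List (List Int)) (moves : List Int) (out : Int) : Prop :=
  out = solution_alt board moves
instance (board : List (List Int)) (moves : List Int) (out : Int) : Decidable (Spec_solution board moves out) := by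
  unfold Spec_solution; infer_instance

-- ===== CLAIM (what is proved, stated in full; the proofs are below) =====
def Claim_equal_solution : Prop := ∀ (board : List (List Int)) (moves : List Int),
  Dom_solution board moves → Pre_solution board moves →
  Spec_solution board moves (solution board moves)

-- ===== LEMMAS AND PROOFS =====

def colNZ (grid : List (List Int)) (c : Int) : List Int :=
  (grid.map (fun row => PySem.List.pyGetD row c 0)).filter (fun v => v ≠ 0)

lemma colNZ_cons (row : List Int) (rest : List (List Int)) (c : Int) :
    colNZ (row :: rest) c =
      (if PySem.List.pyGetD row c 0 ≠ 0 then [PySem.List.pyGetD row c 0] else []) ++ colNZ rest c := by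
  simp only [colNZ, List.map_cons, List.filter_cons]
  split_ifs with h <;> simp_all

lemma pyGetD_pySetD_self (row : List Int) (c : Int) (v d : Int)
    (h0 : 0 ≤ c) (h1 : c < (row.length : Int)) :
    PySem.List.pyGetD (PySem.List.pySetD row c v) c d = v := by
  rw [PySem.List.pySetD_of_nonneg _ _ h0,
      PySem.List.pyGetD_eq_getElem _ _ h0 (by simpa using h1)]
  rw [List.getElem_set_self]

lemma pyGetD_pySetD_ne (row : List Int) (c c' : Int) (v d : Int)
    (h0 : 0 ≤ c) (h0' : 0 ≤ c') (hne : c' ≠ c) :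
    PySem.List.pyGetD (PySem.List.pySetD row c v) c' d = PySem.List.pyGetD row c' d := by
  rw [PySem.List.pySetD_of_nonneg _ _ h0]
  have hc : c' = ((c'.toNat : Nat) : Int) := by omega
  rw [hc, PySem.List.pyGetD_natCast, PySem.List.pyGetD_natCast]
  have hnn : c.toNat ≠ c'.toNat := by omega
  simp [List.getD, List.getElem?_set_ne hnn]

lemma pickCol_fst (c : Int) (grid : List (List Int)) :
    (pickCol c grid).1 = (colNZ grid c).head? := by
  induction grid with
  | nil => simp [pickCol, colNZ]
  | cons row rest ih =>
    rw [colNZ_cons]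
    by_cases h : PySem.List.pyGetD row c 0 ≠ 0 <;> simp [pickCol, h, ih]

lemma pickCol_none (c : Int) (grid : List (List Int)) (h : colNZ grid c = []) :
    pickCol c grid = (none, grid) := by
  induction grid with
  | nil => simp [pickCol]
  | cons row rest ih =>
    rw [colNZ_cons] at h
    have h1 : ¬ PySem.List.pyGetD row c 0 ≠ 0 := by
      by_contra hc; simp [hc] at h
    have h2 : colNZ rest c = [] := by
      simpa [h1] using h
    simp [pickCol, h1, ih h2]

lemma pickCol_len (c : Int) (grid : List (List Int)) :
    ((pickCol c grid).2).map List.length = grid.map List.length := by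
  induction grid with
  | nil => simp [pickCol]
  | cons row rest ih =>
    by_cases h : PySem.List.pyGetD row c 0 ≠ 0 <;>
      simp [pickCol, h, ih, PySem.List.length_pySetD]

lemma pickCol_self (c : Int) (grid : List (List Int))
    (h0 : 0 ≤ c) (hlt : ∀ row ∈ grid, c < (row.length : Int)) :
    colNZ (pickCol c grid).2 c = (colNZ grid c).tail := by
  induction grid with
  | nil => simp [pickCol, colNZ]
  | cons row rest ih =>
    by_cases h : PySem.List.pyGetD row c 0 ≠ 0
    · have hz := pyGetD_pySetD_self row c 0 0 h0 (hlt row (by simp))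
      simp only [pickCol, if_pos h]
      rw [colNZ_cons, colNZ_cons, if_pos h]
      simp [hz]
    · have := ih (fun r hr => hlt r (by simp [hr]))
      simp only [pickCol, if_neg h]
      rw [colNZ_cons, colNZ_cons, if_neg h]
      simpa [h] using this

lemma pickCol_other (c c' : Int) (grid : List (List Int))
    (h0 : 0 ≤ c) (h0' : 0 ≤ c') (hne : c' ≠ c) :
    colNZ (pickCol c grid).2 c' = colNZ grid c' := by
  induction grid with
  | nil => simp [pickCol]
  | cons row rest ih =>
    by_cases h : PySem.List.pyGetD row c 0 ≠ 0
    · simp only [pickCol, if_pos h]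
      rw [colNZ_cons, colNZ_cons, pyGetD_pySetD_ne row c c' 0 0 h0 h0' hne]
    · simp only [pickCol, if_neg h]
      rw [colNZ_cons, colNZ_cons, ih]

lemma getD_set' (l : List (List Int)) (a j : Nat) (v : List Int) :
    (l.set a v).getD j [] = if a = j ∧ a < l.length then v else l.getD j [] := by
  by_cases h : a = j ∧ a < l.length
  · obtain ⟨rfl, h2⟩ := h
    simp [List.getD, h2]
  · rcases Decidable.not_and_iff_not_or_not.mp h with h1 | h1
    · simp [List.getD, List.getElem?_set_ne h1, h]
    · have : l.set a v = l := List.set_eq_of_length_le (by omega)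
      simp [this, h]

lemma laneRow_spec (board : List (List Int)) (i : Int) :
    ∀ (k a : Nat) (lane : List (List Int)), a + k = board.length → lane.length = board.length →
    ((PySem.List.pyRange (a : Int) (board.length : Int) 1).foldl (fun lane j =>
        if PySem.List.pyGetD (PySem.List.pyGetD board i []) j 0 ≠ 0 then
          PySem.List.pySetD lane j
            (PySem.List.pyGetD lane j [] ++ [PySem.List.pyGetD (PySem.List.pyGetD board i []) j 0])
        else lane) lane).length = board.length ∧
    ∀ j : Nat, j < board.length →
      ((PySem.List.pyRange (a : Int) (board.length : Int) 1).foldl (fun lane j =>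
        if PySem.List.pyGetD (PySem.List.pyGetD board i []) j 0 ≠ 0 then
          PySem.List.pySetD lane j
            (PySem.List.pyGetD lane j [] ++ [PySem.List.pyGetD (PySem.List.pyGetD board i []) j 0])
        else lane) lane).getD j [] =
      if a ≤ j then
        lane.getD j [] ++ (if PySem.List.pyGetD (PySem.List.pyGetD board i []) (j : Int) 0 ≠ 0 then
          [PySem.List.pyGetD (PySem.List.pyGetD board i []) (j : Int) 0] else [])
      else lane.getD j [] := by
  intro k
  induction k with
  | zero =>
    intro a lane ha hl
    have : PySem.List.pyRange (a : Int) (board.length : Int) 1 = [] :=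
      PySem.List.pyRange_one_eq_nil (by omega)
    rw [this]
    refine ⟨hl, fun j hj => ?_⟩
    simp only [List.foldl_nil]
    rw [if_neg (by omega)]
  | succ k ih =>
    intro a lane ha hl
    have hab : (a : Int) < (board.length : Int) := by omega
    rw [PySem.List.pyRange_one_cons hab, List.foldl_cons]
    -- the one-step result lane1
    set cell := PySem.List.pyGetD (PySem.List.pyGetD board i []) (a : Int) 0 with hcell
    have step : (if cell ≠ 0 then
        PySem.List.pySetD lane (a : Int) (PySem.List.pyGetD lane (a : Int) [] ++ [cell])
      else lane).length = board.length ∧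
      ∀ j : Nat, (if cell ≠ 0 then
        PySem.List.pySetD lane (a : Int) (PySem.List.pyGetD lane (a : Int) [] ++ [cell])
      else lane).getD j [] =
        if a = j then lane.getD j [] ++ (if cell ≠ 0 then [cell] else []) else lane.getD j [] := by
      by_cases hc : cell ≠ 0
      · rw [if_pos hc]
        constructor
        · rw [PySem.List.pySetD_of_nonneg _ _ (by omega)]
          simpa using hl
        · intro j
          rw [PySem.List.pySetD_of_nonneg _ _ (by omega)]
          simp only [Int.toNat_natCast]
          rw [getD_set' lane a j _]
          by_cases hj : a = j
          · subst hj
            rw [if_pos ⟨rfl, by omega⟩, if_pos rfl, if_pos hc]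
            rw [PySem.List.pyGetD_natCast]
          · rw [if_neg (by tauto), if_neg hj]
      · rw [if_neg hc]
        refine ⟨hl, fun j => ?_⟩
        by_cases hj : a = j
        · subst hj; rw [if_pos rfl, if_neg hc, List.append_nil]
        · rw [if_neg hj]
    have hcast : ((a : Int) + 1) = ((a + 1 : Nat) : Int) := by push_cast; ring
    rw [hcast]
    obtain ⟨ihlen, ihget⟩ := ih (a + 1) _ (by omega) step.1
    refine ⟨ihlen, fun j hj => ?_⟩
    rw [ihget j hj, step.2 j]
    by_cases h1 : a + 1 ≤ j
    · rw [if_pos h1, if_neg (show ¬ a = j by omega), if_pos (show a ≤ j by omega)]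
    · by_cases h2 : a = j
      · subst h2
        rw [if_neg h1, if_pos rfl, if_pos (le_refl a)]
      · rw [if_neg h1, if_neg h2, if_neg (show ¬ a ≤ j by omega)]

lemma build_spec (board : List (List Int)) :
    ∀ (is : List Int) (lane : List (List Int)), lane.length = board.length →
    (is.foldl (pvLaneRow board) lane).length = board.length ∧
    ∀ j : Nat, j < board.length →
      (is.foldl (pvLaneRow board) lane).getD j [] =
        lane.getD j [] ++
          ((is.map (fun i => PySem.List.pyGetD (PySem.List.pyGetD board i []) (j : Int) 0)).filter
            (fun v => v ≠ 0)) := by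
  intro is
  induction is with
  | nil => intro lane hl; exact ⟨hl, fun j _ => by simp⟩
  | cons i rest ih =>
    intro lane hl
    rw [List.foldl_cons]
    have hrow := laneRow_spec board i board.length 0 lane (by omega) hl
    simp only [Nat.cast_zero] at hrow
    have hrow0 : (pvLaneRow board lane i).length = board.length ∧
        ∀ j : Nat, j < board.length → (pvLaneRow board lane i).getD j [] =
          lane.getD j [] ++ (if PySem.List.pyGetD (PySem.List.pyGetD board i []) (j : Int) 0 ≠ 0 then
            [PySem.List.pyGetD (PySem.List.pyGetD board i []) (j : Int) 0] else []) := by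
      constructor
      · rw [pvLaneRow]; exact hrow.1
      · intro j hj
        rw [pvLaneRow]
        simpa using hrow.2 j hj
    obtain ⟨ihlen, ihget⟩ := ih (pvLaneRow board lane i) hrow0.1
    refine ⟨ihlen, fun j hj => ?_⟩
    rw [ihget j hj, hrow0.2 j hj, List.map_cons, List.filter_cons, List.append_assoc]
    split_ifs <;> simp_all

def pvInv (n : Nat) (lane grid : List (List Int)) : Prop :=
  lane.length = n ∧ (∀ row ∈ grid, n ≤ row.length) ∧
  ∀ j : Nat, j < n → lane.getD j [] = (colNZ grid (j : Int)).reverse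

lemma lane_init_inv (board : List (List Int)) (hrows : ∀ row ∈ board, board.length ≤ row.length) :
    pvInv board.length
      ((PySem.List.pyRange ((board.length : Int) - 1) (-1) (-1)).foldl (pvLaneRow board)
        ((PySem.List.pyRange 0 (board.length : Int) 1).map (fun _ => ([] : List Int))))
      board := by
  have hinit_len : ((PySem.List.pyRange 0 (board.length : Int) 1).map
      (fun _ => ([] : List Int))).length = board.length := by
    simp [PySem.List.length_pyRange_one]
  have hinit_get : ∀ j : Nat, ((PySem.List.pyRange 0 (board.length : Int) 1).map
      (fun _ => ([] : List Int))).getD j [] = [] := by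
    intro j
    rcases Nat.lt_or_ge j ((PySem.List.pyRange 0 (board.length : Int) 1).map
      (fun _ => ([] : List Int))).length with h | h
    · rw [List.getD_eq_getElem _ _ h]
      simp
    · rw [List.getD_eq_default _ _ h]
  obtain ⟨hlen, hget⟩ := build_spec board
    (PySem.List.pyRange ((board.length : Int) - 1) (-1) (-1)) _ hinit_len
  refine ⟨hlen, hrows, fun j hj => ?_⟩
  rw [hget j hj, hinit_get j, List.nil_append]
  rw [PySem.List.pyRange_neg_one_eq_reverse]
  have : ((-1 : Int) + 1) = 0 := by ring
  rw [this]
  have : ((board.length : Int) - 1 + 1) = (board.length : Int) := by ring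
  rw [this]
  rw [List.map_reverse, List.filter_reverse]
  congr 1
  show (((PySem.List.pyRange 0 (board.length : Int) 1).map
      (fun i => PySem.List.pyGetD (PySem.List.pyGetD board i []) (j : Int) 0)).filter (fun v => v ≠ 0)) = colNZ board (j : Int)
  rw [colNZ]
  congr 1
  have hcomp : (fun i => PySem.List.pyGetD (PySem.List.pyGetD board i []) (j : Int) 0) =
      (fun row => PySem.List.pyGetD row (j : Int) 0) ∘ (fun i => PySem.List.pyGetD board i []) := rfl
  rw [hcomp, ← List.map_map, PySem.List.map_pyGetD_pyRange_zero']

lemma pyGetD_canon_neg {α : Type} (xs : List α) (c : Int) (d : α)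
    (h1 : -(xs.length : Int) ≤ c) (h2 : c < 0) :
    PySem.List.pyGetD xs c d = xs.getD ((xs.length : Int) + c).toNat d := by
  rw [show c = -(((-c).toNat : Nat) : Int) by omega]
  rw [PySem.List.pyGetD_neg_natCast xs (-c).toNat d (by omega) (by omega)]
  have hidx : (((xs.length : Int) + -(((-c).toNat : Nat) : Int)).toNat) = xs.length - (-c).toNat := by
    omega
  rw [hidx, List.getD_eq_getElem _ _ (by omega)]

lemma pySetD_canon {α : Type} (xs : List α) (c : Int) (v : α)
    (h1 : -(xs.length : Int) ≤ c) (h2 : c < 0) :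
    PySem.List.pySetD xs c v = xs.set ((xs.length : Int) + c).toNat v := by
  simp only [PySem.List.pySetD, PySem.List.pySet?, PySem.List.pyIdx?]
  rw [if_neg (by omega), if_pos (by simpa using h1)]
  simp only [Option.map_some, Option.getD_some]
  congr 1
  omega

lemma pickCol_shift (N : Nat) (c : Int) (grid : List (List Int))
    (hsq : ∀ row ∈ grid, row.length = N) (h1 : -(N : Int) ≤ c) (h2 : c < 0) :
    pickCol c grid = pickCol ((N : Int) + c) grid := by
  induction grid with
  | nil => rfl
  | cons row rest ih =>
    have hrl : row.length = N := hsq row (by simp)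
    have hget : PySem.List.pyGetD row c 0 = PySem.List.pyGetD row ((N : Int) + c) 0 := by
      rw [pyGetD_canon_neg row c 0 (by omega) h2]
      rw [show ((N : Int) + c) = (((((N : Int) + c).toNat) : Nat) : Int) by omega,
        PySem.List.pyGetD_natCast]
      congr 1
      omega
    have hset : PySem.List.pySetD row c 0 = PySem.List.pySetD row ((N : Int) + c) 0 := by
      rw [pySetD_canon row c 0 (by omega) h2, PySem.List.pySetD_of_nonneg _ _ (by omega)]
      congr 1
      omega
    simp only [pickCol, hget, hset, ih (fun r hr => hsq r (List.mem_cons_of_mem _ hr))]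

lemma fold_eq (n : Nat) :
    ∀ (ms : List Int) (lane grid : List (List Int)) (stack : List Int) (ans : Int),
    pvInv n lane grid →
    (∀ m ∈ ms, 1 - (n : Int) ≤ m ∧ m ≤ (n : Int)) →
    ((∀ m ∈ ms, 1 ≤ m) ∨ (∀ row ∈ grid, row.length = n)) →
    (ms.foldl pvStepA (lane, stack, ans)).2 = (ms.foldl pvStepB (grid, stack, ans)).2 := by
  intro ms
  induction ms with
  | nil => intro lane grid stack ans _ _ _; rfl
  | cons m rest ih =>
    intro lane grid stack ans hinv hms hsq
    obtain ⟨hm1, hm2⟩ := hms m (List.mem_cons_self ..)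
    obtain ⟨hlen, hrows, hlane⟩ := hinv
    have hrest : ∀ m' ∈ rest, 1 - (n : Int) ≤ m' ∧ m' ≤ (n : Int) :=
      fun m' hm' => hms m' (List.mem_cons_of_mem _ hm')
    -- the canonical (non-negative) column index j used by this move, with the
    -- three facts bridging Python's possibly-negative index m-1 to it
    obtain ⟨j, hj, hsetL, hgetL, hpick⟩ :
        ∃ j : Nat, j < n ∧
          (∀ v : List Int, PySem.List.pySetD lane (m - 1) v = lane.set j v) ∧
          PySem.List.pyGetD lane (m - 1) [] = lane.getD j [] ∧
          pickCol (m - 1) grid = pickCol ((j : Nat) : Int) grid := by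
      by_cases hpos : 1 ≤ m
      · refine ⟨(m - 1).toNat, by omega, ?_, ?_, ?_⟩
        · intro v; rw [PySem.List.pySetD_of_nonneg _ _ (by omega)]
        · rw [show m - 1 = (((m - 1).toNat : Nat) : Int) by omega, PySem.List.pyGetD_natCast]
          simp
        · rw [show (((m - 1).toNat : Nat) : Int) = m - 1 by omega]
      · have hsq' : ∀ row ∈ grid, row.length = n := by
          rcases hsq with h | h
          · exact absurd (h m (List.mem_cons_self ..)) hpos
          · exact h
        refine ⟨((n : Int) + m - 1).toNat, by omega, ?_, ?_, ?_⟩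
        · intro v
          rw [pySetD_canon lane (m - 1) v (by omega) (by omega)]
          congr 1
          omega
        · rw [pyGetD_canon_neg lane (m - 1) [] (by omega) (by omega)]
          congr 1
          omega
        · rw [pickCol_shift n (m - 1) grid hsq' (by omega) (by omega)]
          congr 1
          omega
    have hsqr : (∀ m' ∈ rest, 1 ≤ m') ∨ (∀ row ∈ grid, row.length = n) := by
      rcases hsq with h | h
      · exact Or.inl (fun m' hm' => h m' (List.mem_cons_of_mem _ hm'))
      · exact Or.inr h
    have hlj : PySem.List.pyGetD lane (m - 1) [] = (colNZ grid ((j : Nat) : Int)).reverse := by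
      rw [hgetL, hlane j hj]
    have hjlt : ∀ row ∈ grid, ((j : Nat) : Int) < (row.length : Int) := by
      intro row hr
      have := hrows row hr
      omega
    rw [List.foldl_cons, List.foldl_cons]
    rcases hcol : colNZ grid ((j : Nat) : Int) with _ | ⟨v, vs⟩
    · -- empty column: both steps do nothing to the stack/answer
      have hA : pvStepA (lane, stack, ans) m = (lane, stack, ans) := by
        unfold pvStepA
        simp only [hlj, hcol, List.reverse_nil, ne_eq, not_true_eq_false, if_false]
      have hpc : pickCol (m - 1) grid = (none, grid) := by
        rw [hpick]
        exact pickCol_none _ _ hcol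
      have hB' : pvStepB (grid, stack, ans) m = (grid, stack, ans) := by
        unfold pvStepB
        rw [hpc]
      rw [hA, hB']
      exact ih lane grid stack ans ⟨hlen, hrows, hlane⟩ hrest hsqr
    · -- non-empty column: both pick v
      have hlj' : PySem.List.pyGetD lane (m - 1) [] = vs.reverse ++ [v] := by
        rw [hlj, hcol, List.reverse_cons]
      have hdoll : PySem.List.pyGetD (vs.reverse ++ [v]) (-1) 0 = v :=
        PySem.List.pyGetD_neg_one_append_singleton _ _ _
      have hlane' : PySem.List.pySetD lane (m - 1) ((vs.reverse ++ [v]).dropLast) =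
          lane.set j vs.reverse := by
        rw [hsetL, List.dropLast_concat]
      have hpc : pickCol (m - 1) grid = (some v, (pickCol ((j : Nat) : Int) grid).2) := by
        rw [hpick]
        refine Prod.ext ?_ rfl
        rw [pickCol_fst, hcol]
        rfl
      -- the new invariant
      have hinv' : pvInv n (lane.set j vs.reverse) (pickCol ((j : Nat) : Int) grid).2 := by
        refine ⟨by simpa using hlen, ?_, ?_⟩
        · intro row' hr'
          have hmem : row'.length ∈ ((pickCol ((j : Nat) : Int) grid).2).map List.length :=
            List.mem_map_of_mem hr'
          rw [pickCol_len] at hmem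
          obtain ⟨row, hrow, hlenr⟩ := List.mem_map.mp hmem
          rw [← hlenr]
          exact hrows row hrow
        · intro j' hj'
          rw [getD_set']
          by_cases hjj : j = j'
          · subst hjj
            rw [if_pos ⟨rfl, by omega⟩]
            have : colNZ (pickCol ((j : Nat) : Int) grid).2 ((j : Nat) : Int) =
                (colNZ grid ((j : Nat) : Int)).tail :=
              pickCol_self ((j : Nat) : Int) grid (by omega) hjlt
            rw [this, hcol]
            rfl
          · rw [if_neg (by tauto)]
            have : colNZ (pickCol ((j : Nat) : Int) grid).2 ((j' : Nat) : Int) =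
                colNZ grid ((j' : Nat) : Int) :=
              pickCol_other ((j : Nat) : Int) ((j' : Nat) : Int) grid (by omega) (by omega)
                (by omega)
            rw [this]
            exact hlane j' hj'
      -- squareness (when claimed) survives the pick: row lengths are unchanged
      have hsqr' : (∀ m' ∈ rest, 1 ≤ m') ∨
          (∀ row ∈ (pickCol ((j : Nat) : Int) grid).2, row.length = n) := by
        rcases hsqr with h | h
        · exact Or.inl h
        · refine Or.inr fun row' hr' => ?_
          have hmem : row'.length ∈ ((pickCol ((j : Nat) : Int) grid).2).map List.length :=
            List.mem_map_of_mem hr'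
          rw [pickCol_len] at hmem
          obtain ⟨row, hrow, hlenr⟩ := List.mem_map.mp hmem
          rw [← hlenr]
          exact h row hrow
      by_cases hcond : stack ≠ [] ∧ v = PySem.List.pyGetD stack (-1) 0
      · have hA : pvStepA (lane, stack, ans) m =
            (lane.set j vs.reverse, stack.dropLast, ans + 2) := by
          unfold pvStepA
          simp only [hlj', hdoll, hlane']
          rw [if_pos (by simp), if_pos hcond]
        have hB : pvStepB (grid, stack, ans) m =
            ((pickCol ((j : Nat) : Int) grid).2, stack.dropLast, ans + 2) := by
          unfold pvStepB
          rw [hpc]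
          simp only
          rw [if_pos ⟨hcond.1, hcond.2.symm⟩]
        rw [hA, hB]
        exact ih _ _ _ _ hinv' hrest hsqr'
      · have hA : pvStepA (lane, stack, ans) m =
            (lane.set j vs.reverse, stack ++ [v], ans) := by
          unfold pvStepA
          simp only [hlj', hdoll, hlane']
          rw [if_pos (by simp), if_neg hcond]
        have hB : pvStepB (grid, stack, ans) m =
            ((pickCol ((j : Nat) : Int) grid).2, stack ++ [v], ans) := by
          unfold pvStepB
          rw [hpc]
          simp only
          rw [if_neg (fun hc => hcond ⟨hc.1, hc.2.symm⟩)]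
        rw [hA, hB]
        exact ih _ _ _ _ hinv' hrest hsqr'

-- ===== VERDICT (by name: the statement is the Claim_ definition above) =====
theorem solution_spec : Claim_equal_solution := by
  intro board moves _ hpre
  unfold Spec_solution solution solution_alt
  have h1 := fold_eq board.length moves
    ((PySem.List.pyRange ((board.length : Int) - 1) (-1) (-1)).foldl (pvLaneRow board)
      ((PySem.List.pyRange 0 (board.length : Int) 1).map (fun _ => ([] : List Int))))
    board [] 0 (lane_init_inv board hpre.1) hpre.2.1 hpre.2.2
  simp only [List.map_id']
  rw [h1]
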